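-- pv_equiv track=rewrite | github.com/VigoWB/python | Advent_2015/Day_5/Day5.py | czesc_dwa
-- ===== SOURCE A (Python) =====
-- def czesc_dwa(napis: str) -> bool:
--     podwojne = False
--     for litera in range(len(napis) - 2):     #szukam podwojne znaki ale rozdzielone
--         if napis[litera] == napis[litera + 2]:
--             podwojne = True
--
--     powtorka = False
--     for znak in range(len(napis) - 1):     #podwojne powtorzone gdzies w wierszu
--         if napis[znak:znak +2] in napis[:znak]:
--             powtorka = True
--
--     wiersz = False
--     if podwojne == True and powtorka == True:
--         wiersz = True
--     return wiersz
-- ===== SOURCE B (Python) =====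
-- def czesc_dwa(napis: str) -> bool:
--     # bigram index: first and last position of every bigram, then test the span
--     podwojne = any(a == c for a, c in zip(napis, napis[2:]))
--     span = {}
--     for i, p in enumerate(zip(napis, napis[1:])):
--         span[p] = (span.get(p, (i, i))[0], i)
--     powtorka = any(hi - lo >= 2 for lo, hi in span.values())
--     return podwojne and powtorka
-- ===== Notes on version B (the rewrite author's own statement) =====
-- stated objective: faster
-- what changed: Replaced A's index loops (the second doing a quadratic substring search of each pair in the growing prefix) with a bigram index: one dict pass over zip(s, s[1:]) records each pair's first and last position, a pair repeats without overlap iff its span is >= 2, and the separated double letter is a zip(s, s[2:]) comparison.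
import Mathlib
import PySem

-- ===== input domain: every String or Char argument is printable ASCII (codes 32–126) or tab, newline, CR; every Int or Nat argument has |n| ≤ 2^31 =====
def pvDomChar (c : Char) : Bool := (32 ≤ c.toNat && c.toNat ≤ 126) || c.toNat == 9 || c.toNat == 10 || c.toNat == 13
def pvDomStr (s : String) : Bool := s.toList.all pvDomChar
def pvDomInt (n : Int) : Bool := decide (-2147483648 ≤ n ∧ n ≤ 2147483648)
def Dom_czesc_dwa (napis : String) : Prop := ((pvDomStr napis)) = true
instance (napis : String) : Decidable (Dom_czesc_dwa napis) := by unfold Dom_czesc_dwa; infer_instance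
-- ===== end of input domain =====

-- B replaces A's two index loops (the second a quadratic pair-in-prefix substring scan) by a
-- bigram index: one dict pass recording first and last position of every adjacent pair, then a
-- span test, plus a zip comparison for the separated double letter (objective: faster).

-- ===== PORT A =====
def czesc_dwa (napis : String) : Bool :=
  let l := napis.toList
  let n : Int := (l.length : Int)
  -- for litera in range(len(napis) - 2): if napis[litera] == napis[litera + 2]: podwojne = True
  let podwojne := (PySem.List.pyRange 0 (n - 2) 1).foldl
    (fun podwojne litera =>
      if PySem.List.pyGet? l litera = PySem.List.pyGet? l (litera + 2) then true else podwojne)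
    false
  -- for znak in range(len(napis) - 1): if napis[znak:znak+2] in napis[:znak]: powtorka = True
  let powtorka := (PySem.List.pyRange 0 (n - 1) 1).foldl
    (fun powtorka znak =>
      if PySem.Chars.isIn (PySem.List.slice l (some znak) (some (znak + 2)))
          (PySem.List.slice l none (some znak)) = true then true else powtorka)
    false
  if podwojne = true ∧ powtorka = true then true else false

-- ===== PORT B =====
def czesc_dwa_alt (napis : String) : Bool :=
  let l := napis.toList
  -- podwojne = any(a == c for a, c in zip(napis, napis[2:]))
  let podwojne := (l.zip (l.drop 2)).any (fun p => p.1 == p.2)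
  -- for i, p in enumerate(zip(napis, napis[1:])): span[p] = (span.get(p, (i, i))[0], i)
  let span := (PySem.List.enumerate (l.zip (l.drop 1)) 0).foldl
    (fun d ip => d.insert ip.2 ((d.getD ip.2 (ip.1, ip.1)).1, ip.1))
    PySem.Dict.empty
  -- powtorka = any(hi - lo >= 2 for lo, hi in span.values())
  let powtorka := (PySem.Dict.values span).any (fun q => decide (q.2 - q.1 ≥ 2))
  podwojne && powtorka

-- ===== PRECONDITION & SPEC =====
def Spec_czesc_dwa (napis : String) (out : Bool) : Prop := out = czesc_dwa_alt napis
instance (napis : String) (out : Bool) : Decidable (Spec_czesc_dwa napis out) := by unfold Spec_czesc_dwa; infer_instance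

-- ===== CLAIM (what is proved, stated in full; the proofs are below) =====
def Claim_equal_czesc_dwa : Prop := ∀ (napis : String), Dom_czesc_dwa napis → Spec_czesc_dwa napis (czesc_dwa napis)

-- ===== LEMMAS AND PROOFS =====

-- the pair (2-gram) starting at index j, as A's slices produce it
def pairAt (l : List Char) (j : Nat) : List Char := (l.drop j).take 2

-- first / last occurrence index of q in ps, as B's dict records them
def fIdx {α : Type} [BEq α] (ps : List α) (q : α) : Int := (ps.idxOf q : Int)
def lIdx {α : Type} [BEq α] (ps : List α) (q : α) : Int :=
  (ps.length : Int) - 1 - (ps.reverse.idxOf q : Int)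

lemma foldl_if_or {α : Type} (C : α → Prop) [DecidablePred C] (r : List α) (b : Bool) :
    r.foldl (fun p i => if C i then true else p) b = (b || r.any fun i => decide (C i)) := by
  induction r generalizing b with
  | nil => simp
  | cons x xs ih =>
    rw [List.foldl_cons, ih]
    by_cases h : C x <;> simp [h]

lemma any_range_decide (P : Nat → Prop) [DecidablePred P] (m : Nat) :
    (List.range m).any (fun j => decide (P j)) = decide (∃ i < m, P i) := by
  rw [Bool.eq_iff_iff]
  simp

lemma ite_and_true (a b : Bool) : (if a = true ∧ b = true then true else false) = (a && b) := by
  cases a <;> cases b <;> simp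

lemma pyRange_sub2 (len : Nat) :
    PySem.List.pyRange 0 ((len : Int) - 2) 1
      = (List.range (len - 2)).map (fun (j : Nat) => (j : Int)) := by
  rw [PySem.List.pyRange_one]
  have h : ((len : Int) - 2 - 0).toNat = len - 2 := by omega
  rw [h]
  simp

lemma pyRange_sub1 (len : Nat) :
    PySem.List.pyRange 0 ((len : Int) - 1) 1
      = (List.range (len - 1)).map (fun (j : Nat) => (j : Int)) := by
  rw [PySem.List.pyRange_one]
  have h : ((len : Int) - 1 - 0).toNat = len - 1 := by omega
  rw [h]
  simp

lemma slice_pair (l : List Char) (i : Nat) :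
    PySem.List.slice l (some (i : Int)) (some ((i : Int) + 2)) = pairAt l i := by
  have h2 : ((i : Int) + 2) = ((i + 2 : Nat) : Int) := by push_cast; ring
  rw [h2, PySem.List.slice_natCast]
  have h3 : i + 2 - i = 2 := by omega
  rw [h3, pairAt]

-- A's substring test on a pair, characterised
lemma isIn_pair (l : List Char) (i : Nat) (hi : i + 2 ≤ l.length) :
    PySem.Chars.isIn (pairAt l i) (l.take i) = true
      ↔ ∃ j < i, j + 2 ≤ i ∧ pairAt l j = pairAt l i := by
  rw [← PySem.Chars.exists_prefix_drop_iff_isIn]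
  have hplen : (pairAt l i).length = 2 := by
    simp only [pairAt, List.length_take, List.length_drop]; omega
  constructor
  · rintro ⟨j, hp⟩
    have hle := hp.length_le
    have hlen2 : ((l.take i).drop j).length = i - j := by
      simp only [List.length_drop, List.length_take]; omega
    have hj2 : j + 2 ≤ i := by omega
    refine ⟨j, by omega, hj2, ?_⟩
    have he := (List.prefix_iff_eq_take.mp hp)
    rw [hplen, List.drop_take, List.take_take] at he
    have hm : min 2 (i - j) = 2 := by omega
    rw [hm] at he
    exact he.symm
  · rintro ⟨j, hj, hj2, heq⟩
    refine ⟨j, ?_⟩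
    rw [List.drop_take]
    have he : pairAt l j = ((l.drop j).take (i - j)).take 2 := by
      rw [List.take_take]
      have hm : min 2 (i - j) = 2 := by omega
      rw [hm, pairAt]
    rw [← heq, he]
    exact List.take_prefix _ _

-- the first occurrence of xs[i] is no later than i
lemma idxOf_getElem_le {α : Type} [BEq α] [LawfulBEq α] (l : List α) (i : Nat)
    (h : i < l.length) : l.idxOf l[i] ≤ i := by
  have hmem : l[i] ∈ l.take (i+1) :=
    List.mem_take_iff_getElem.mpr ⟨i, by simp [h], by simp⟩
  have hsplit : l = l.take (i+1) ++ l.drop (i+1) := (List.take_append_drop _ _).symm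
  have hlt := List.idxOf_lt_length_of_mem hmem
  calc l.idxOf l[i] = (l.take (i+1) ++ l.drop (i+1)).idxOf l[i] := by rw [← hsplit]
    _ = (l.take (i+1)).idxOf l[i] := by rw [List.idxOf_append, if_pos hmem]
    _ ≤ i := by simp [List.length_take] at hlt; omega

lemma fIdx_append_of_mem {α : Type} [BEq α] [LawfulBEq α] (xs : List α) (x q : α)
    (hq : q ∈ xs) : fIdx (xs ++ [x]) q = fIdx xs q := by
  simp [fIdx, List.idxOf_append, hq]

lemma fIdx_append_self {α : Type} [BEq α] [LawfulBEq α] (xs : List α) (x : α)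
    (hx : x ∉ xs) : fIdx (xs ++ [x]) x = (xs.length : Int) := by
  simp [fIdx, List.idxOf_append, hx]

lemma lIdx_append_self {α : Type} [BEq α] [LawfulBEq α] (xs : List α) (x : α) :
    lIdx (xs ++ [x]) x = (xs.length : Int) := by
  simp [lIdx, List.reverse_append]

lemma lIdx_append_of_ne {α : Type} [BEq α] [LawfulBEq α] (xs : List α) (x q : α)
    (h : q ≠ x) : lIdx (xs ++ [x]) q = lIdx xs q := by
  simp only [lIdx, List.reverse_append, List.reverse_cons, List.reverse_nil, List.nil_append,
    List.singleton_append, List.idxOf_cons_ne _ (fun he => h he.symm), List.length_append,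
    List.length_singleton]
  push_cast [Nat.succ_eq_add_one]
  ring

-- B's dict after the whole loop: one entry per distinct pair, holding (first, last) index
lemma span_items {α : Type} [BEq α] [LawfulBEq α] [DecidableEq α] (ps : List α) :
    ((PySem.List.enumerate ps 0).foldl
        (fun d ip => d.insert ip.2 ((d.getD ip.2 (ip.1, ip.1)).1, ip.1))
        (PySem.Dict.empty : PySem.Dict α (Int × Int))).items
      = (PySem.Set.ofList ps).map (fun q => (q, (fIdx ps q, lIdx ps q))) := by
  induction ps using List.reverseRecOn with
  | nil => simp [PySem.List.enumerate_nil, PySem.Dict.empty, PySem.Set.ofList_nil]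
  | append_singleton xs x ih =>
    rw [PySem.List.enumerate_append, List.foldl_append]
    rw [show PySem.List.enumerate [x] (0 + (xs.length : Int)) = [((xs.length : Int), x)] by
      rw [PySem.List.enumerate_cons, PySem.List.enumerate_nil]; norm_num]
    set d := (PySem.List.enumerate xs 0).foldl
        (fun d ip => d.insert ip.2 ((d.getD ip.2 (ip.1, ip.1)).1, ip.1))
        (PySem.Dict.empty : PySem.Dict α (Int × Int)) with hd
    have hkeys : d.keys = PySem.Set.ofList xs := by
      simp [PySem.Dict.keys, ih, Function.comp_def]
    have hnodup : d.keys.Nodup := by rw [hkeys]; exact PySem.Set.nodup_ofList xs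
    simp only [List.foldl_cons, List.foldl_nil]
    by_cases hx : x ∈ xs
    · have hc : d.contains x = true := by
        rw [PySem.Dict.contains_iff_mem_keys, hkeys, PySem.Set.mem_ofList]; exact hx
      have hgd : d.getD x ((xs.length : Int), (xs.length : Int)) = (fIdx xs x, lIdx xs x) := by
        refine PySem.Dict.getD_of_mem_items d ?_ hnodup _
        rw [ih]
        exact List.mem_map_of_mem ((PySem.Set.mem_ofList _ _).mpr hx)
      rw [PySem.Dict.items_insert_of_contains d _ hc, ih, List.map_map, hgd]
      rw [show PySem.Set.ofList (xs ++ [x]) = PySem.Set.ofList xs by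
        rw [PySem.Set.ofList_append_singleton,
          PySem.Set.add_of_mem ((PySem.Set.mem_ofList _ _).mpr hx)]]
      refine List.map_congr_left (fun q hq => ?_)
      have hqxs : q ∈ xs := (PySem.Set.mem_ofList _ _).mp hq
      by_cases hqx : q = x
      · subst hqx
        simp only [Function.comp_apply, beq_self_eq_true, if_pos]
        rw [fIdx_append_of_mem xs q q hqxs, lIdx_append_self]
      · simp only [Function.comp_apply, beq_iff_eq, if_neg hqx]
        rw [fIdx_append_of_mem xs x q hqxs, lIdx_append_of_ne xs x q hqx]
    · have hc : d.contains x = false := by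
        rw [← Bool.not_eq_true, PySem.Dict.contains_iff_mem_keys, hkeys, PySem.Set.mem_ofList]
        exact hx
      rw [PySem.Dict.items_insert_of_not_contains d _ hc,
        PySem.Dict.getD_of_not_contains d _ hc, ih]
      rw [PySem.Set.ofList_append_singleton,
        PySem.Set.add_of_not_mem (fun h => hx ((PySem.Set.mem_ofList _ _).mp h)), List.map_append]
      congr 1
      · refine List.map_congr_left (fun q hq => ?_)
        have hqxs : q ∈ xs := (PySem.Set.mem_ofList _ _).mp hq
        have hqx : q ≠ x := fun he => hx (he ▸ hqxs)
        rw [fIdx_append_of_mem xs x q hqxs, lIdx_append_of_ne xs x q hqx]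
      · simp only [List.map_cons, List.map_nil]
        rw [fIdx_append_self xs x hx, lIdx_append_self]

-- the 2-gram list: pairAt in terms of the zipped pair list
lemma pairAt_eq (l : List Char) (i : Nat) (h : i + 1 < l.length) :
    pairAt l i = [l[i], l[i+1]] := by
  rw [pairAt, List.drop_eq_getElem_cons (by omega), List.drop_eq_getElem_cons h]
  rfl

-- the main bridge: A's pair-in-prefix condition vs B's span condition
lemma bridge (l : List Char) :
    (∃ i < l.length - 1, ∃ j < i, j + 2 ≤ i ∧ pairAt l j = pairAt l i)
      ↔ ∃ q ∈ l.zip (l.drop 1),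
          lIdx (l.zip (l.drop 1)) q - fIdx (l.zip (l.drop 1)) q ≥ 2 := by
  set ps := l.zip (l.drop 1) with hps
  have hlen : ps.length = l.length - 1 := by
    simp [hps, List.length_zip]
  have hget : ∀ i (h : i < ps.length), ps[i] = (l[i]'(by omega), l[i+1]'(by omega)) := by
    intro i h
    simp [hps, List.getElem_zip]
  have hpair : ∀ i j (hi : i < ps.length) (hj : j < ps.length),
      (pairAt l j = pairAt l i ↔ ps[j] = ps[i]) := by
    intro i j hi hj
    rw [pairAt_eq l i (by omega), pairAt_eq l j (by omega), hget i hi, hget j hj]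
    simp
  constructor
  · rintro ⟨i, hi, j, hj, hj2, heq⟩
    have hips : i < ps.length := by omega
    have hjps : j < ps.length := by omega
    refine ⟨ps[i], List.getElem_mem hips, ?_⟩
    have hpe : ps[j] = ps[i] := (hpair i j hips hjps).mp heq
    have hf : ps.idxOf ps[i] ≤ j := by
      rw [← hpe]; exact idxOf_getElem_le ps j hjps
    have hrev : ps.reverse.idxOf ps[i] ≤ ps.length - 1 - i := by
      have hk : ps.length - 1 - i < ps.reverse.length := by simp; omega
      have : ps.reverse[ps.length - 1 - i] = ps[i] := by
        rw [List.getElem_reverse]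
        congr 1
        omega
      rw [← this]
      exact idxOf_getElem_le ps.reverse _ hk
    unfold lIdx fIdx
    omega
  · rintro ⟨q, hq, hge⟩
    have hne : ps.length ≠ 0 := by
      intro h0; rw [List.length_eq_zero_iff.mp h0] at hq; exact absurd hq (List.not_mem_nil)
    set j := ps.idxOf q with hjdef
    have hj : j < ps.length := List.idxOf_lt_length_of_mem hq
    have hjq : ps[j] = q := List.getElem_idxOf hj
    set r := ps.reverse.idxOf q with hrdef
    have hr : r < ps.length := by
      have := List.idxOf_lt_length_of_mem (List.mem_reverse.mpr hq)
      simpa using this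
    set i := ps.length - 1 - r with hidef
    have hiq : ps[i]'(by omega) = q := by
      have : ps.reverse[r]'(by simp; omega) = q := List.getElem_idxOf (by simpa using hr)
      rw [List.getElem_reverse] at this
      exact this
    have hfl : lIdx ps q - fIdx ps q = (i : Int) - (j : Int) := by
      unfold lIdx fIdx
      omega
    rw [hfl] at hge
    refine ⟨i, by omega, j, by omega, by omega, ?_⟩
    exact (hpair i j (by omega) (by omega)).mpr (by rw [hjq, hiq])

-- ===== VERDICT (by name: the statement is the Claim_ definition above) =====
theorem czesc_dwa_spec : Claim_equal_czesc_dwa := by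
  intro napis _
  unfold Spec_czesc_dwa
  simp only [czesc_dwa, czesc_dwa_alt]
  set l := napis.toList with hl
  rw [pyRange_sub2, pyRange_sub1, List.foldl_map, List.foldl_map]
  rw [foldl_if_or (fun litera : Nat => PySem.List.pyGet? l (litera : Int)
        = PySem.List.pyGet? l ((litera : Int) + 2)),
      foldl_if_or (fun znak : Nat => PySem.Chars.isIn
        (PySem.List.slice l (some (znak : Int)) (some ((znak : Int) + 2)))
        (PySem.List.slice l none (some (znak : Int))) = true)]
  rw [any_range_decide, any_range_decide]
  simp only [Bool.false_or, ite_and_true]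
  simp only [PySem.Dict.values]
  rw [span_items, List.map_map]
  congr 1
  · -- separated double letter: A's index loop vs B's zip
    rw [Bool.eq_iff_iff, decide_eq_true_iff, List.any_eq_true]
    constructor
    · rintro ⟨i, hi, h⟩
      have h2 : ((i : Int) + 2) = ((i + 2 : Nat) : Int) := by push_cast; ring
      rw [h2, PySem.List.pyGet?_natCast, PySem.List.pyGet?_natCast] at h
      have hzl : i < (l.zip (l.drop 2)).length := by simp [List.length_zip]; omega
      refine ⟨(l.zip (l.drop 2))[i], List.getElem_mem hzl, ?_⟩
      rw [List.getElem_zip]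
      simp only [List.getElem_drop]
      have ha : l[i]? = some (l[i]'(by omega)) := List.getElem?_eq_getElem (by omega)
      have hb : l[i+2]? = some (l[i+2]'(by omega)) := List.getElem?_eq_getElem (by omega)
      rw [ha, hb] at h
      simp only [Option.some.injEq] at h
      have hcomm : 2 + i = i + 2 := by omega
      simp [hcomm, h]
    · rintro ⟨q, hq, hpq⟩
      obtain ⟨i, hi, rfl⟩ := List.getElem_of_mem hq
      have hil : i < l.length - 2 := by
        simp [List.length_zip] at hi; omega
      refine ⟨i, hil, ?_⟩
      have h2 : ((i : Int) + 2) = ((i + 2 : Nat) : Int) := by push_cast; ring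
      rw [h2, PySem.List.pyGet?_natCast, PySem.List.pyGet?_natCast]
      rw [List.getElem_zip] at hpq
      simp only [List.getElem_drop, beq_iff_eq] at hpq
      have hcomm : 2 + i = i + 2 := by omega
      have h3 : l[i]? = l[2+i]? := by
        rw [List.getElem?_eq_getElem (by omega), List.getElem?_eq_getElem (by omega)]
        exact congrArg some hpq
      rw [hcomm] at h3
      exact h3
  · -- repeated pair: A's prefix scan vs B's span dict
    rw [Bool.eq_iff_iff, decide_eq_true_iff, List.any_eq_true]
    have hA : (∃ i < l.length - 1, PySem.Chars.isIn
        (PySem.List.slice l (some (i : Int)) (some ((i : Int) + 2)))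
        (PySem.List.slice l none (some (i : Int))) = true)
        ↔ ∃ i < l.length - 1, ∃ j < i, j + 2 ≤ i ∧ pairAt l j = pairAt l i := by
      refine exists_congr fun i => and_congr_right fun hi => ?_
      rw [slice_pair, PySem.List.slice_to_natCast]
      exact isIn_pair l i (by omega)
    rw [hA, bridge]
    simp only [List.mem_map, Function.comp_apply, decide_eq_true_eq]
    constructor
    · rintro ⟨q, hq, h⟩
      exact ⟨(fIdx (l.zip (List.drop 1 l)) q, lIdx (l.zip (List.drop 1 l)) q),
        ⟨q, (PySem.Set.mem_ofList _ _).mpr hq, rfl⟩, h⟩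
    · rintro ⟨v, ⟨q, hq, rfl⟩, h⟩
      exact ⟨q, (PySem.Set.mem_ofList _ _).mp hq, h⟩
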